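-- pv_equiv track=rewrite | github.com/bqtruong/CS-1110 | email_finder.py | dcheck
-- ===== SOURCE A (Python) =====
-- def dcheck(endgroup):
--     if "." not in endgroup:
--         return False
--     tld = 0
--     for char in endgroup[::-1]:
--         if char.isalpha():
--             tld += 1
--         elif char == ".":
--             break
--         else:
--             return False
--     if tld < 2:
--         return False
--     else:
--         return True
-- ===== SOURCE B (Python) =====
-- def dcheck(endgroup):
--     if "." not in endgroup:
--         return False
--     tld = endgroup.rsplit(".", 1)[-1]
--     return len(tld) >= 2 and tld.isalpha()
-- ===== Notes on version B (the rewrite author's own statement) =====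
-- stated objective: simpler
-- what changed: Replaces the reverse char-by-char scan with its counter and break/return control flow by a split-then-validate decomposition: take the substring after the last dot and check length >= 2 and isalpha in one shot.
import Mathlib
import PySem

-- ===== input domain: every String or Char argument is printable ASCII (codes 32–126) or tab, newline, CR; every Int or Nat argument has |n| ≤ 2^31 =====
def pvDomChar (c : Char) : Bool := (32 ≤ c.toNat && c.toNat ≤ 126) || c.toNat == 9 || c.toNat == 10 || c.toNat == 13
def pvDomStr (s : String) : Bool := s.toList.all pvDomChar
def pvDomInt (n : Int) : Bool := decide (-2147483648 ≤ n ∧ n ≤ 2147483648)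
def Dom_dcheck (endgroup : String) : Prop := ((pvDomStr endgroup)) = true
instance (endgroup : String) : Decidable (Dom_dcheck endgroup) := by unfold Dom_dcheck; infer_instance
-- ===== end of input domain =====

-- B replaces A's reverse scan (counter + break/return control flow) by split-then-validate:
-- take the substring after the last dot, then check length >= 2 and isalpha (objective: simpler).

-- ===== PORT A =====
-- the 'for char in endgroup[::-1]' loop; none = the loop hit 'return False',
-- some tld = the loop finished (by 'break' on '.' or by exhausting the string) with counter tld
def dcheckLoopA : List Char → Int → Option Int
  | [], tld => some tld
  | c :: rest, tld =>
    if PySem.Chars.isalpha c then dcheckLoopA rest (tld + 1)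
    else if c = '.' then some tld
    else none

def dcheck (endgroup : String) : Bool :=
  if PySem.Str.isIn "." endgroup = false then false
  else
    match PySem.List.slice? endgroup.toList none none (-1) with
    | none => false   -- unreachable: step is -1 ≠ 0
    | some rev =>
      match dcheckLoopA rev 0 with
      | none => false
      | some tld => if tld < 2 then false else true

-- ===== PORT B =====
def dcheck_alt (endgroup : String) : Bool :=
  if PySem.Str.isIn "." endgroup = false then false
  else
    -- endgroup.rsplit(".", 1)[-1], ported by hand (PySem has no rsplit): since "." occurs in
    -- the string, this is exactly the suffix after the LAST '.', computed as
    -- reverse (takeWhile (≠ '.') (reverse chars)) — exact on that branch.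
    let tld : List Char := (endgroup.toList.reverse.takeWhile (fun c => c ≠ '.')).reverse
    decide (2 ≤ tld.length) && PySem.Chars.strIsalpha tld

-- ===== PRECONDITION & SPEC =====
def Spec_dcheck (endgroup : String) (out : Bool) : Prop := out = dcheck_alt endgroup
instance (endgroup : String) (out : Bool) : Decidable (Spec_dcheck endgroup out) := by unfold Spec_dcheck; infer_instance

-- ===== CLAIM (what is proved, stated in full; the proofs are below) =====
def Claim_equal_dcheck : Prop := ∀ (endgroup : String), Dom_dcheck endgroup → Spec_dcheck endgroup (dcheck endgroup)

-- ===== LEMMAS AND PROOFS =====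

-- A's loop, characterised: it succeeds iff every char before the first '.' (of the list it
-- scans) is alphabetic, and then returns the accumulator plus the length of that prefix.
theorem dcheckLoopA_eq (l : List Char) (acc : Int) :
    dcheckLoopA l acc =
      if (l.takeWhile (fun c => c ≠ '.')).all PySem.Chars.isalpha then
        some (acc + ((l.takeWhile (fun c => c ≠ '.')).length : Int))
      else none := by
  induction l generalizing acc with
  | nil => simp [dcheckLoopA]
  | cons c rest ih =>
    by_cases ha : PySem.Chars.isalpha c
    · have hne : c ≠ '.' := by
        intro h; subst h; simp [PySem.Chars.isalpha, PySem.Chars.isupper, PySem.Chars.islower] at ha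
      simp only [dcheckLoopA, ha, if_true]
      rw [ih]
      simp only [List.takeWhile_cons, hne, ne_eq, not_false_eq_true, decide_true, if_true,
        List.all_cons, ha, Bool.true_and, List.length_cons]
      split_ifs with hcond
      · congr 1; push_cast; ring
      · rfl
    · by_cases hd : c = '.'
      · subst hd
        simp [dcheckLoopA, ha]
      · simp [dcheckLoopA, ha, hd]

-- ===== VERDICT (by name: the statement is the Claim_ definition above) =====
theorem dcheck_spec : Claim_equal_dcheck := by
  intro s _
  unfold Spec_dcheck dcheck dcheck_alt
  split_ifs with h
  · rfl
  · rw [PySem.List.slice?_none_none_neg_one]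
    simp only [dcheckLoopA_eq]
    set p := s.toList.reverse.takeWhile (fun c => c ≠ '.') with hp
    by_cases hall : p.all PySem.Chars.isalpha = true
    · simp only [hall, if_true]
      have hrev : p.reverse.all PySem.Chars.isalpha = true := by
        rwa [List.all_reverse]
      by_cases hlen : 2 ≤ p.length
      · have h2 : p ≠ [] := List.ne_nil_of_length_pos (by omega)
        have h3 : ¬ p.length ≤ 1 := by omega
        have h4 : p.isEmpty = false := by simp [h2]
        simp [PySem.Chars.strIsalpha, hrev, h3, h4, hlen]
      · simp [hlen]
        omega
    · have hfalse : p.reverse.all PySem.Chars.isalpha = false := by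
        rw [List.all_reverse]
        exact Bool.eq_false_iff.mpr hall
      simp [hall, PySem.Chars.strIsalpha, hfalse]
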